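-- pv_equiv track=rewrite | github.com/Summercoconutt/Dissertation | voter_base_expansion/dao_eligible_reconstruct_full.py | detect_strategy_flags
-- ===== SOURCE A (Python) =====
-- from typing import Any, Dict, List, Optional, Tuple, Iterable, Set
--
-- def detect_strategy_flags(strategies: List[dict]) -> dict:
--     names = [(s.get("name") or "").lower() for s in strategies]
--     flags = {
--         "has_erc20_balance": any("erc20" in n and "balance" in n for n in names) or any("erc20-balance-of" in n for n in names),
--         "has_erc20_votes": any("votes" in n for n in names),
--         "has_delegation": any("delegation" in n for n in names),
--         "has_lp_or_staking": any(k in n for n in names for k in ["lp", "pool", "staking", "staked", "farm", "vault"]),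
--         "has_multi_asset": len(names) > 1,
--     }
--     return flags
-- ===== SOURCE B (Python) =====
-- def detect_strategy_flags(strategies):
--     has_bal = has_votes = has_del = has_lp = False
--     for s in strategies:
--         n = (s.get("name") or "").lower()
--         has_bal = has_bal or ("erc20" in n and "balance" in n)
--         has_votes = has_votes or ("votes" in n)
--         has_del = has_del or ("delegation" in n)
--         has_lp = has_lp or any(k in n for k in ("lp", "pool", "staking", "staked", "farm", "vault"))
--     return {
--         "has_erc20_balance": has_bal,
--         "has_erc20_votes": has_votes,
--         "has_delegation": has_del,
--         "has_lp_or_staking": has_lp,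
--         "has_multi_asset": len(strategies) > 1,
--     }
-- ===== Notes on version B (the rewrite author's own statement) =====
-- stated objective: simpler
-- what changed: B makes a single pass over the strategies, lowercasing each name once and or-accumulating all four substring flags in one loop, instead of building a names list and running five separate any()-scans; the redundant 'erc20-balance-of' clause (whose match already implies the 'erc20'+'balance' clause) is dropped.
import Mathlib
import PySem

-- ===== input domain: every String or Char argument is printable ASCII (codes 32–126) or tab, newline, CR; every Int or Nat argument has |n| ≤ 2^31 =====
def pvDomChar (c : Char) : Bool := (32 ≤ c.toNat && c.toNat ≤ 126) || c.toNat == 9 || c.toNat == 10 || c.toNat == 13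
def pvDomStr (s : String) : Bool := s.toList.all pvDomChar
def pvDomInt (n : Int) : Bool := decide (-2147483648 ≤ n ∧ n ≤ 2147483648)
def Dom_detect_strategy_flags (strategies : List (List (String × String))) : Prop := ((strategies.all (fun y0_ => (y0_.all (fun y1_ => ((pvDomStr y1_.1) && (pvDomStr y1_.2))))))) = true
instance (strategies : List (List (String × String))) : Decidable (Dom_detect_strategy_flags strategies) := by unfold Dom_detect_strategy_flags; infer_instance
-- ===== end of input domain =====

-- B replaces A's names list + five separate any()-scans by one accumulating pass
-- (each name lowercased once, flags or-ed in; the redundant 'erc20-balance-of' clause is dropped): simpler.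


-- ===== PORT A =====
-- s.get("name") on the association list (first match; none → Python None), then `or ""`:
-- an absent key and a falsy (empty) string both give "" — exact for string-valued dicts.
def pvName (s : List (String × String)) : String :=
  match s.find? (fun p => p.1 == "name") with
  | some p => p.2
  | none => ""

def pvLpKeys : List String := ["lp", "pool", "staking", "staked", "farm", "vault"]

def detect_strategy_flags (strategies : List (List (String × String))) : List (String × Bool) :=
  let names := strategies.map (fun s => PySem.Str.lower (pvName s))
  [("has_erc20_balance",
      (names.any (fun n => PySem.Str.isIn "erc20" n && PySem.Str.isIn "balance" n))
        || (names.any (fun n => PySem.Str.isIn "erc20-balance-of" n))),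
   ("has_erc20_votes", names.any (fun n => PySem.Str.isIn "votes" n)),
   ("has_delegation", names.any (fun n => PySem.Str.isIn "delegation" n)),
   ("has_lp_or_staking", names.any (fun n => pvLpKeys.any (fun k => PySem.Str.isIn k n))),
   ("has_multi_asset", decide (1 < names.length))]

-- ===== PORT B =====
def detect_strategy_flags_alt (strategies : List (List (String × String))) : List (String × Bool) :=
  let st := strategies.foldl
    (fun (acc : Bool × Bool × Bool × Bool) s =>
      let n := PySem.Str.lower (pvName s)
      (acc.1 || (PySem.Str.isIn "erc20" n && PySem.Str.isIn "balance" n),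
       acc.2.1 || PySem.Str.isIn "votes" n,
       acc.2.2.1 || PySem.Str.isIn "delegation" n,
       acc.2.2.2 || pvLpKeys.any (fun k => PySem.Str.isIn k n)))
    (false, false, false, false)
  [("has_erc20_balance", st.1),
   ("has_erc20_votes", st.2.1),
   ("has_delegation", st.2.2.1),
   ("has_lp_or_staking", st.2.2.2),
   ("has_multi_asset", decide (1 < strategies.length))]

-- ===== PRECONDITION & SPEC =====
def Spec_detect_strategy_flags (strategies : List (List (String × String))) (out : List (String × Bool)) : Prop := out = detect_strategy_flags_alt strategies
instance (strategies : List (List (String × String))) (out : List (String × Bool)) : Decidable (Spec_detect_strategy_flags strategies out) := by unfold Spec_detect_strategy_flags; infer_instance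

-- ===== CLAIM (what is proved, stated in full; the proofs are below) =====
def Claim_equal_detect_strategy_flags : Prop := ∀ (strategies : List (List (String × String))), Dom_detect_strategy_flags strategies → Spec_detect_strategy_flags strategies (detect_strategy_flags strategies)

-- ===== LEMMAS AND PROOFS =====

-- B's fold computes the four or-accumulated any's.
theorem fold_eq_any (l : List (List (String × String))) (a b c d : Bool) :
    l.foldl
      (fun (acc : Bool × Bool × Bool × Bool) s =>
        let n := PySem.Str.lower (pvName s)
        (acc.1 || (PySem.Str.isIn "erc20" n && PySem.Str.isIn "balance" n),
         acc.2.1 || PySem.Str.isIn "votes" n,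
         acc.2.2.1 || PySem.Str.isIn "delegation" n,
         acc.2.2.2 || pvLpKeys.any (fun k => PySem.Str.isIn k n)))
      (a, b, c, d)
    = (a || l.any (fun s => PySem.Str.isIn "erc20" (PySem.Str.lower (pvName s)) && PySem.Str.isIn "balance" (PySem.Str.lower (pvName s))),
       b || l.any (fun s => PySem.Str.isIn "votes" (PySem.Str.lower (pvName s))),
       c || l.any (fun s => PySem.Str.isIn "delegation" (PySem.Str.lower (pvName s))),
       d || l.any (fun s => pvLpKeys.any (fun k => PySem.Str.isIn k (PySem.Str.lower (pvName s))))) := by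
  induction l generalizing a b c d with
  | nil => simp only [List.foldl_nil, List.any_nil, Bool.or_false]
  | cons x xs ih =>
      simp only [List.foldl_cons, List.any_cons]
      rw [ih]
      simp only [Bool.or_assoc]

-- a match of "erc20-balance-of" is in particular a match of "erc20" and of "balance"
theorem sub_implies (n : String) (h : PySem.Str.isIn "erc20-balance-of" n = true) :
    PySem.Str.isIn "erc20" n = true ∧ PySem.Str.isIn "balance" n = true := by
  rw [PySem.Str.isIn_iff_infix] at h
  refine ⟨?_, ?_⟩ <;> rw [PySem.Str.isIn_iff_infix]
  · exact List.IsInfix.trans (by decide) h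
  · exact List.IsInfix.trans (by decide) h

-- hence A's second any() is redundant
theorem or_redundant {α : Type} (l : List α) (f : α → String) :
    ((l.any (fun s => PySem.Str.isIn "erc20" (f s) && PySem.Str.isIn "balance" (f s)))
      || (l.any (fun s => PySem.Str.isIn "erc20-balance-of" (f s))))
    = l.any (fun s => PySem.Str.isIn "erc20" (f s) && PySem.Str.isIn "balance" (f s)) := by
  cases hB : l.any (fun s => PySem.Str.isIn "erc20-balance-of" (f s)) with
  | false => rw [Bool.or_false]
  | true =>
      obtain ⟨s, hs, hsub⟩ := List.any_eq_true.mp hB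
      obtain ⟨h1, h2⟩ := sub_implies (f s) hsub
      have hA : (l.any (fun s => PySem.Str.isIn "erc20" (f s) && PySem.Str.isIn "balance" (f s))) = true :=
        List.any_eq_true.mpr ⟨s, hs, by rw [h1, h2]; rfl⟩
      rw [hA, Bool.true_or]

-- ===== VERDICT (by name: the statement is the Claim_ definition above) =====
theorem detect_strategy_flags_spec : Claim_equal_detect_strategy_flags := by
  intro strategies _
  unfold Spec_detect_strategy_flags detect_strategy_flags detect_strategy_flags_alt
  rw [fold_eq_any]
  simp only [Bool.false_or, List.any_map, List.length_map, Function.comp_def]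
  rw [or_redundant]
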